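-- pv_equiv track=rewrite | github.com/miliar/Code_Jam_Webscraper | Solutions_python/Problem_201/475.py | staller
-- ===== SOURCE A (Python) =====
-- def staller(n, k):
--     """
--     """
--
--     # Isolate the last one...
--     k -= 1
--
--     # First try to perform "full" divisions
--     dg = 1
--     g = 0
--     while k >= dg:
--         # Ok, still margin to spend...
--         k -= dg
--         g += dg
--         # Next step
--         dg *= 2
--
--     # Ok, reduce n accordingly
--     a, xtra = divmod(n-g, g+1)
--
--     # Now we have r gaps of a+1 and g+1-r gaps of a
--     # to put the last k elements
--     # And let the last one choose place
--     k += 1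
--     if k > xtra:
--         # Last selected is an "a" gap
--         last = a
--     else:
--         last = a + 1
--
--     # In a gap of size a = 2*m + r
--     # left = m + r - 1 and right = m
--     m, r = divmod(last, 2)
--     return m + r - 1, m
-- ===== SOURCE B (Python) =====
-- def staller(n, k):
--     k -= 1
--     # closed form for A's doubling loop: number of completed levels L, gap g = 2**L - 1
--     L = (k + 1).bit_length() - 1 if k > 0 else 0
--     g = (1 << L) - 1
--     k -= g
--     a, xtra = divmod(n - g, g + 1)
--     k += 1
--     last = a if k > xtra else a + 1
--     m, r = divmod(last, 2)
--     return m + r - 1, m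
-- ===== Notes on version B (the rewrite author's own statement) =====
-- stated objective: alternative
-- what changed: Replaced the iterative power-of-two accumulation loop with a closed-form computation of the completed doubling levels via (k+1).bit_length(), so g is computed in O(1) instead of a loop.
import Mathlib
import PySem

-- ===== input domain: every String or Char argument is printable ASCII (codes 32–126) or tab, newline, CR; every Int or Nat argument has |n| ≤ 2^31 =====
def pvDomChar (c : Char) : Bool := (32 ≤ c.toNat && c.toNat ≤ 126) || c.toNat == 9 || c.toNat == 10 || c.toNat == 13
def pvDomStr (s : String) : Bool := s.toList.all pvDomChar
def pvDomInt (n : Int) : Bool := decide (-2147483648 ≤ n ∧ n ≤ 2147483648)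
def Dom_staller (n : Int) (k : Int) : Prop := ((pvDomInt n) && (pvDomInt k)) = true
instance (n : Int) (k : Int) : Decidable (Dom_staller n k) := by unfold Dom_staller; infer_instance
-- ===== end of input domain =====

-- B replaces A's doubling while-loop by a closed-form bit_length computation of the gap; return value only, same arithmetic tail.

-- ===== PORT A =====
-- A's while loop: state (k, dg, g); dg ≥ 1 is an invariant carried as a hypothesis for termination.
def stallerLoop (k dg g : Int) (h : 1 ≤ dg) : Int × Int :=
  if hk : dg ≤ k then
    stallerLoop (k - dg) (dg * 2) (g + dg) (by omega)
  else
    (k, g)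
termination_by k.toNat
decreasing_by omega

def staller (n : Int) (k : Int) : Int × Int :=
  let k := k - 1
  let (k, g) := stallerLoop k 1 0 (by omega)
  let a := PySem.Int.floordiv (n - g) (g + 1)
  let xtra := PySem.Int.mod (n - g) (g + 1)
  let k := k + 1
  let last := if xtra < k then a else a + 1
  let m := PySem.Int.floordiv last 2
  let r := PySem.Int.mod last 2
  (m + r - 1, m)

-- ===== PORT B =====
def staller_alt (n : Int) (k : Int) : Int × Int :=
  let k := k - 1
  let L : Nat := if 0 < k then PySem.Int.bitLength (k + 1) - 1 else 0
  let g : Int := 2 ^ L - 1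
  let k := k - g
  let a := PySem.Int.floordiv (n - g) (g + 1)
  let xtra := PySem.Int.mod (n - g) (g + 1)
  let k := k + 1
  let last := if xtra < k then a else a + 1
  let m := PySem.Int.floordiv last 2
  let r := PySem.Int.mod last 2
  (m + r - 1, m)

-- ===== PRECONDITION & SPEC =====
def Spec_staller (n : Int) (k : Int) (out : Int × Int) : Prop := out = staller_alt n k
instance (n : Int) (k : Int) (out : Int × Int) : Decidable (Spec_staller n k out) := by unfold Spec_staller; infer_instance

-- ===== CLAIM (what is proved, stated in full; the proofs are below) =====
def Claim_equal_staller : Prop := ∀ (n : Int) (k : Int), Dom_staller n k → Spec_staller n k (staller n k)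

-- ===== LEMMAS AND PROOFS =====

-- The loop computes (k - (2^L - 1)*d, g + (2^L - 1)*d) where L counts the iterations.
theorem stallerLoop_eq (L : Nat) : ∀ (k d g : Int) (h : 1 ≤ d),
    (2 ^ L - 1) * d ≤ k → k < (2 ^ (L + 1) - 1) * d →
    stallerLoop k d g h = (k - (2 ^ L - 1) * d, g + (2 ^ L - 1) * d) := by
  induction L with
  | zero =>
    intro k d g h h1 h2
    rw [stallerLoop]
    simp only [pow_zero] at *
    rw [dif_neg (by omega)]
    simp only [Prod.mk.injEq]
    constructor <;> omega
  | succ L ih =>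
    intro k d g h h1 h2
    have hp : (0 : Int) < 2 ^ L := pow_pos (by norm_num) L
    have e1 : (2 : Int) ^ (L + 1) = 2 ^ L * 2 := by ring
    have e2 : (2 : Int) ^ (L + 1 + 1) = 2 ^ L * 4 := by ring
    rw [e1] at h1
    rw [e2] at h2
    rw [stallerLoop, dif_pos (by nlinarith)]
    rw [ih (k - d) (d * 2) (g + d) (by omega) (by nlinarith) (by rw [e1]; nlinarith)]
    simp only [Prod.mk.injEq]
    constructor <;> nlinarith

-- Closed form of the loop from B: gap = 2^L - 1 with L from bitLength.
theorem loop_closed (k0 : Int) (h : (1 : Int) ≤ 1) :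
    stallerLoop k0 1 0 h =
      (k0 - (2 ^ (if 0 < k0 then PySem.Int.bitLength (k0 + 1) - 1 else 0) - 1),
       2 ^ (if 0 < k0 then PySem.Int.bitLength (k0 + 1) - 1 else 0) - 1) := by
  rcases le_or_gt k0 0 with hk | hk
  · rw [if_neg (by omega), stallerLoop, dif_neg (by omega)]
    norm_num
  · rw [if_pos hk]
    set L := PySem.Int.bitLength (k0 + 1) - 1 with hL
    have hne : k0 + 1 ≠ 0 := by omega
    have habs : ((k0 + 1).natAbs : Int) = k0 + 1 := Int.natAbs_of_nonneg (by omega)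
    have hblpos : 1 ≤ PySem.Int.bitLength (k0 + 1) := by
      by_contra hc
      have h0 : PySem.Int.bitLength (k0 + 1) = 0 := by omega
      have := PySem.Int.lt_two_pow_bitLength (k0 + 1)
      rw [h0] at this
      omega
    have hlow : (2 : Int) ^ L ≤ k0 + 1 := by
      have h1 := PySem.Int.two_pow_bitLength_le (k0 + 1) hne
      calc (2 : Int) ^ L = ((2 ^ L : Nat) : Int) := by push_cast; ring
        _ ≤ ((k0 + 1).natAbs : Int) := by exact_mod_cast h1
        _ = k0 + 1 := habs
    have hhigh : k0 + 1 < (2 : Int) ^ (L + 1) := by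
      have h2 := PySem.Int.lt_two_pow_bitLength (k0 + 1)
      have hLe : L + 1 = PySem.Int.bitLength (k0 + 1) := by omega
      calc k0 + 1 = ((k0 + 1).natAbs : Int) := habs.symm
        _ < ((2 ^ PySem.Int.bitLength (k0 + 1) : Nat) : Int) := by exact_mod_cast h2
        _ = (2 : Int) ^ (L + 1) := by rw [hLe]; push_cast; ring
    rw [stallerLoop_eq L k0 1 0 h (by omega) (by omega)]
    simp only [Prod.mk.injEq]
    constructor <;> ring

-- ===== VERDICT (by name: the statement is the Claim_ definition above) =====
theorem staller_spec : Claim_equal_staller := by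
  intro n k _
  unfold Spec_staller staller staller_alt
  simp only [loop_closed]
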